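-- pv_equiv track=rewrite | github.com/flyingtext/spacetime | keyword_highlight_plugin.py | _insert_tags
-- ===== SOURCE A (Python) =====
-- from typing import List, Tuple
--
-- def _insert_tags(html_content: str, spans: List[Tuple[int, int]]) -> str:
--     result: List[str] = []
--     plain_idx = 0
--     span_iter = iter(sorted(spans, key=lambda s: s[0]))
--     current = next(span_iter, None)
--     i = 0
--     while i < len(html_content):
--         if current and plain_idx == current[1]:
--             result.append('</strong></u>')
--             current = next(span_iter, None)
--             continue
--         if html_content[i] == '<':
--             j = html_content.find('>', i) + 1
--             result.append(html_content[i:j])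
--             i = j
--             continue
--         if current and plain_idx == current[0]:
--             result.append('<u><strong>')
--         result.append(html_content[i])
--         plain_idx += 1
--         i += 1
--     if current and plain_idx == current[1]:
--         result.append('</strong></u>')
--     return ''.join(result)
-- ===== SOURCE B (Python) =====
-- from typing import List, Tuple
--
-- _OPEN = '<u><strong>'
-- _CLOSE = '</strong></u>'
--
--
-- def _insert_tags(html_content: str, spans: List[Tuple[int, int]]) -> str:
--     # Phase 1: tokenize the HTML once into (is_tag, text) tokens.
--     tokens = []
--     i, n = 0, len(html_content)
--     while i < n:
--         if html_content[i] == '<':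
--             j = html_content.find('>', i) + 1
--             tokens.append((True, html_content[i:j]))
--             i = j
--         else:
--             tokens.append((False, html_content[i]))
--             i += 1
--     plain_len = sum(1 for is_tag, _ in tokens if not is_tag)
--     # Phase 2: walk the sorted spans once over the plain positions 0..plain_len,
--     # building an event table: closes[p] = number of close tags due at plain
--     # boundary p (right after plain char p-1), opens[p] = open tag due right
--     # before plain char p.
--     pending = sorted(spans, key=lambda s: s[0])
--     k = 0
--     closes = [0] * (plain_len + 1)
--     opens = [False] * plain_len
--     for p in range(plain_len + 1):
--         while k < len(pending) and pending[k][1] == p: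
--             closes[p] += 1
--             k += 1
--         if p < plain_len:
--             opens[p] = k < len(pending) and pending[k][0] == p
--     # Phase 3: stitch tokens and events together.
--     out = [_CLOSE * closes[0]]
--     p = 0
--     for is_tag, text in tokens:
--         if is_tag:
--             out.append(text)
--         else:
--             if opens[p]:
--                 out.append(_OPEN)
--             out.append(text)
--             p += 1
--             out.append(_CLOSE * closes[p])
--     return ''.join(out)
-- ===== Notes on version B (the rewrite author's own statement) =====
-- stated objective: alternative
-- what changed: A's single online merge loop (advancing span iterator interleaved with the character scan, emitting as it goes) is replaced by a three-phase decomposition: tokenize the HTML once into tag/char tokens, walk the sorted spans once over plain-text boundaries to build a table of open/close insertion events, then stitch tokens and events together.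
-- intended difference: When the HTML ends right at its last plain character (or is empty) and two or more of the spans still pending at the end all end at the plain length P, A's after-loop check emits only one close tag while its in-loop rule drains them all; B uniformly closes every span ending at a boundary, including the final one, which is the intended behaviour. — e.g. on _insert_tags("", [(0, 0), (0, 0)]): A returns "</strong></u>", B returns "</strong></u></strong></u>"
import Mathlib
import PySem

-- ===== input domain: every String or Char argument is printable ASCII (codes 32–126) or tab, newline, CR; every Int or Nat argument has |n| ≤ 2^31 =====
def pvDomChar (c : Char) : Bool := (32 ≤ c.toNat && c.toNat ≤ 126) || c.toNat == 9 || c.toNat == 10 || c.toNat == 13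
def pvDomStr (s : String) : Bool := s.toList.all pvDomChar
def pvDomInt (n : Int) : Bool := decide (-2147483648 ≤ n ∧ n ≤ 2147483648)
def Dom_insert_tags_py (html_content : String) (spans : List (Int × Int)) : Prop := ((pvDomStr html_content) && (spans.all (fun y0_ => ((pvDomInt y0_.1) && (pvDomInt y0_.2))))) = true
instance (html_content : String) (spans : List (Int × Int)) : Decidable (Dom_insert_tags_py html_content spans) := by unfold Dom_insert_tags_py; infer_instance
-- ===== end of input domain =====

-- B replaces A's single online merge loop (advancing span iterator interleaved with the
-- character scan) by a three-phase decomposition: tokenize the HTML, compute a uniform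
-- table of open/close insertion events over plain-text boundaries 0..P, then stitch
-- tokens and events. Objective: alternative decomposition (same asymptotic cost).
-- Intended difference (D_ below): at the very end of the text A emits at most one close
-- tag; B closes every span ending there, as both do at every other boundary.

def pvClose : List Char := "</strong></u>".toList
def pvOpen : List Char := "<u><strong>".toList

-- `html_content.find('>', i)` in suffix form: split the remaining characters at the
-- first '>' (inclusive); `none` = not found (Python's find returns -1 there).
def pvSplitGt : List Char → Option (List Char × List Char)
  | [] => none
  | c :: rest =>
    if c = '>' then some ([c], rest)
    else match pvSplitGt rest with
      | some (a, b) => some (c :: a, b)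
      | none => none

theorem pvSplitGt_len : ∀ {l a b : List Char}, pvSplitGt l = some (a, b) → b.length < l.length := by
  intro l
  induction l with
  | nil => intro a b h; simp [pvSplitGt] at h
  | cons c rest ih =>
    intro a b h
    simp only [pvSplitGt] at h
    split at h
    · obtain ⟨h1, h2⟩ := by simpa using h
      subst h2; simp
    · cases heq : pvSplitGt rest with
      | none => rw [heq] at h; simp at h
      | some ab =>
        obtain ⟨a', b'⟩ := ab
        rw [heq] at h
        simp only [Option.some.injEq, Prod.mk.injEq] at h
        obtain ⟨h1, h2⟩ := h; subst h2
        have := ih heq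
        simp; omega

-- ===== PORT A =====
-- A's while-loop over the remaining characters (suffix form of the index i), carrying
-- plain_idx and the not-yet-consumed sorted spans (head = `current`); `result.append`
-- is rendered by emitting the appended pieces in order, ''.join at the end.
def pvLoopA : List Char → Int → List (Int × Int) → (List (List Char) × Int × List (Int × Int))
  | [], plain, sp => ([], plain, sp)
  | c :: rest, plain, sp =>
    match sp with
    | (a, b) :: sp' =>
      if plain = b then
        -- `if current and plain_idx == current[1]` : close tag, advance the iterator
        let r := pvLoopA (c :: rest) plain sp'
        (pvClose :: r.1, r.2)
      else if c = '<' then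
        match hgt : pvSplitGt rest with
        | some (chunk, rem) =>
          let r := pvLoopA rem plain ((a, b) :: sp')
          (('<' :: chunk) :: r.1, r.2)
        | none => ([], plain, (a, b) :: sp')  -- no '>' after this '<': Python loops forever; excluded by Pre_
      else
        let r := pvLoopA rest (plain + 1) ((a, b) :: sp')
        ((if plain = a then [pvOpen, [c]] else [[c]]) ++ r.1, r.2)
    | [] =>
      if c = '<' then
        match hgt : pvSplitGt rest with
        | some (chunk, rem) =>
          let r := pvLoopA rem plain []
          (('<' :: chunk) :: r.1, r.2)
        | none => ([], plain, [])  -- excluded by Pre_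
      else
        let r := pvLoopA rest (plain + 1) []
        ([c] :: r.1, r.2)
  termination_by cs _ sp => (cs.length, sp.length)
  decreasing_by
  · exact Prod.Lex.right _ (by simp)
  · exact Prod.Lex.left _ _ (Nat.lt_succ_of_lt (pvSplitGt_len (by assumption)))
  · exact Prod.Lex.left _ _ (Nat.lt_succ_self _)
  · exact Prod.Lex.left _ _ (Nat.lt_succ_of_lt (pvSplitGt_len (by assumption)))
  · exact Prod.Lex.left _ _ (Nat.lt_succ_self _)

def insert_tags_py (html_content : String) (spans : List (Int × Int)) : String :=
  let r := pvLoopA html_content.toList 0 (PySem.List.sorted spans (fun s => s.1) false)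
  -- final `if current and plain_idx == current[1]`
  let acc := match r.2.2 with
    | (_, b) :: _ => if r.2.1 = b then r.1 ++ [pvClose] else r.1
    | [] => r.1
  String.mk acc.flatten

-- ===== PORT B =====
-- Phase 1: tokenize the HTML into (is_tag, text) tokens.
def pvTokenize : List Char → List (Bool × List Char)
  | [] => []
  | c :: rest =>
    if c = '<' then
      match hgt : pvSplitGt rest with
      | some (chunk, rem) => (true, '<' :: chunk) :: pvTokenize rem
      | none => [(true, '<' :: rest)]  -- malformed tail (no '>'): excluded by Pre_
    else (false, [c]) :: pvTokenize rest
  termination_by l => l.length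
  decreasing_by
  · exact Nat.lt_succ_of_lt (pvSplitGt_len (by assumption))
  · exact Nat.lt_succ_self _

-- Phase 2 helpers: the inner `while` draining spans that end at plain boundary p,
-- and the per-position event table (closes count, open flag) for p0, p0+1, ….
def pvDrain (p : Int) : List (Int × Int) → Nat × List (Int × Int)
  | (a, b) :: k => if b = p then ((pvDrain p k).1 + 1, (pvDrain p k).2) else (0, (a, b) :: k)
  | [] => (0, [])

def pvEvents : Nat → Int → List (Int × Int) → List (Nat × Bool) × List (Int × Int)
  | 0, _, k => ([], k)
  | n + 1, p, k =>
    let d := pvDrain p k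
    let o : Bool := match d.2 with | (a, _) :: _ => decide (a = p) | [] => false
    let e := pvEvents n (p + 1) d.2
    ((d.1, o) :: e.1, e.2)

def pvCloseRep : Nat → List Char
  | 0 => []
  | n + 1 => pvClose ++ pvCloseRep n

-- Phase 3: stitch tokens with the per-plain-char events (open flag, closes after the char).
def pvStitch : List (Bool × List Char) → List (Bool × Nat) → List Char
  | [], _ => []
  | (true, t) :: toks, evs => t ++ pvStitch toks evs
  | (false, t) :: toks, evs =>
    match evs with
    | (o, c) :: evs' => (if o then pvOpen else []) ++ t ++ pvCloseRep c ++ pvStitch toks evs'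
    | [] => t ++ pvStitch toks []

def pvOutB (toks : List (Bool × List Char)) (p0 : Int) (k : List (Int × Int)) : List Char :=
  let P := (toks.filter (fun t => !t.1)).length
  let e := pvEvents P p0 k
  let cP := (pvDrain (p0 + (P : Int)) e.2).1    -- the uniform drain at the final boundary
  let cs := e.1.map (fun x => x.1) ++ [cP]
  let os := e.1.map (fun x => x.2)
  pvCloseRep (cs.headD 0) ++ pvStitch toks (os.zip cs.tail)

def insert_tags_py_alt (html_content : String) (spans : List (Int × Int)) : String :=
  String.mk (pvOutB (pvTokenize html_content.toList) 0 (PySem.List.sorted spans (fun s => s.1) false))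

-- ===== PRECONDITION & SPEC =====
def pvPreL (l : List Char) : Prop := ∀ i : Nat, i < l.length → l[i]! = '<' → '>' ∈ l.drop i

-- linear-time scanner deciding pvPreL: first component = the suffix contains '>',
-- second = the suffix contains a '<' with no '>' at or after it
def pvScanPre : List Char → Bool × Bool
  | [] => (false, false)
  | c :: t =>
    let s := pvScanPre t
    ((c == '>') || s.1, ((c == '<') && !s.1) || s.2)

theorem pvScanPre_spec : ∀ l : List Char,
    ((pvScanPre l).1 = true ↔ '>' ∈ l) ∧
      ((pvScanPre l).2 = true ↔ ∃ i, i < l.length ∧ l[i]! = '<' ∧ '>' ∉ l.drop i) := by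
  intro l
  induction l with
  | nil => simp [pvScanPre]
  | cons c t ih =>
    obtain ⟨ih1, ih2⟩ := ih
    constructor
    · simp only [pvScanPre, Bool.or_eq_true, beq_iff_eq, List.mem_cons]
      rw [ih1]
      constructor
      · rintro (h | h)
        · exact Or.inl h.symm
        · exact Or.inr h
      · rintro (h | h)
        · exact Or.inl h.symm
        · exact Or.inr h
    · simp only [pvScanPre, Bool.or_eq_true, Bool.and_eq_true, Bool.not_eq_true', beq_iff_eq]
      rw [ih2]
      constructor
      · rintro (⟨hc, hg⟩ | ⟨i, hi, hlt, hg⟩)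
        · refine ⟨0, by simp, by simpa using hc, ?_⟩
          simp only [List.drop_zero, List.mem_cons]
          rintro (h | h)
          · subst hc; exact absurd h.symm (by decide)
          · rw [← ih1, hg] at h; exact absurd h (by simp)
        · exact ⟨i + 1, by simpa using Nat.succ_lt_succ hi, by simpa using hlt, by simpa using hg⟩
      · rintro ⟨i, hi, hlt, hg⟩
        cases i with
        | zero =>
          left
          simp only [List.getElem!_cons_zero] at hlt
          refine ⟨hlt, ?_⟩
          simp only [List.drop_zero] at hg
          cases hs : (pvScanPre t).1
          · rfl
          · exact absurd (List.mem_cons_of_mem c (ih1.mp hs)) hg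
        | succ i' =>
          right
          exact ⟨i', by simpa using hi, by simpa using hlt,
            by simpa using hg⟩

theorem pvScanPre_eq_foldl : ∀ l : List Char,
    l.reverse.foldl (fun s c => ((c == '>') || s.1, ((c == '<') && !s.1) || s.2)) (false, false)
      = pvScanPre l := by
  intro l
  induction l with
  | nil => rfl
  | cons c t ih => simp [List.reverse_cons, List.foldl_append, ih, pvScanPre]

theorem pvPreL_iff_scan (l : List Char) : (pvScanPre l).2 = false ↔ pvPreL l := by
  have hs := (pvScanPre_spec l).2
  constructor
  · intro h i hi hlt
    by_contra hg
    have h2 : (pvScanPre l).2 = true := hs.mpr ⟨i, hi, hlt, hg⟩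
    rw [h] at h2
    exact absurd h2 (by simp)
  · intro h
    cases hval : (pvScanPre l).2
    · rfl
    · obtain ⟨i, hi, hlt, hg⟩ := hs.mp hval
      exact absurd (h i hi hlt) hg

-- Pre_ excludes exactly the inputs on which A never returns: a '<' in html_content with
-- no '>' at or after it makes A's while-loop reset i to 0 forever (find returns -1).
def Pre_insert_tags_py (html_content : String) (spans : List (Int × Int)) : Prop :=
  pvPreL html_content.toList

instance (html_content : String) (spans : List (Int × Int)) : Decidable (Pre_insert_tags_py html_content spans) :=
  decidable_of_iff
    ((html_content.toList.reverse.foldl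
        (fun s c => ((c == '>') || s.1, ((c == '<') && !s.1) || s.2)) (false, false)).2 = false)
    (by rw [pvScanPre_eq_foldl]; exact pvPreL_iff_scan html_content.toList)

def pvWitness_insert_tags_py : String × (List (Int × Int)) := ("a<b>cd", [(1, 2), (0, 3)])

-- D_ helpers: independent shape scans of the input (never the ports).
-- dEndsTagAux/dPlainAux walk the characters with an inside-a-tag flag: dEndsTag says
-- whether the last character belongs to a tag, dPlain counts the plain characters.
def dEndsTagAux : List Char → Bool → Bool → Bool
  | [], _, last => last
  | c :: t, inTag, _ =>
    if inTag then dEndsTagAux t (c != '>') true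
    else if c = '<' then dEndsTagAux t true true
    else dEndsTagAux t false false

def dEndsTag (l : List Char) : Bool := dEndsTagAux l false false

def dPlainAux : List Char → Bool → Nat → Nat
  | [], _, acc => acc
  | c :: t, inTag, acc =>
    if inTag then dPlainAux t (c != '>') acc
    else if c = '<' then dPlainAux t true acc
    else dPlainAux t false (acc + 1)

def dPlain (l : List Char) : Nat := dPlainAux l false 0

-- dBreak P prev bs: position of the first end value that is out of [prev, P) or breaks
-- the weakly increasing run — the spans before it are exactly those whose closes are all
-- emitted before the final boundary.
def dBreak (P : Int) (bs : List Int) : Nat :=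
  ((0 :: bs).zip bs).findIdx (fun q => !(decide (q.1 ≤ q.2 ∧ q.2 < P)))

-- When the HTML ends right at its last plain character (or is empty) and at least two of
-- the spans still pending at the end of the text end exactly at the plain length P, A's
-- final check emits only ONE close tag where its in-loop rule would drain them all; B
-- uniformly closes every such span, which is the intended behaviour.
def D_insert_tags_py (html_content : String) (spans : List (Int × Int)) : Prop :=
  dEndsTag html_content.toList = false ∧
    (let P : Int := (dPlain html_content.toList : Int)
     let bs := (PySem.List.sorted spans (fun s => s.1) false).map (fun s => s.2)
     let t := dBreak P bs
     t + 1 < bs.length ∧ bs.getD t 0 = P ∧ bs.getD (t + 1) 0 = P)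

instance (html_content : String) (spans : List (Int × Int)) : Decidable (D_insert_tags_py html_content spans) := by
  unfold D_insert_tags_py dBreak; infer_instance

def Spec_insert_tags_py (html_content : String) (spans : List (Int × Int)) (out : String) : Prop := ¬ D_insert_tags_py html_content spans → out = insert_tags_py_alt html_content spans
instance (html_content : String) (spans : List (Int × Int)) (out : String) : Decidable (Spec_insert_tags_py html_content spans out) := by unfold Spec_insert_tags_py; infer_instance

def pvDiffWitness_insert_tags_py : String × (List (Int × Int)) := ("", [(0, 0), (0, 0)])
def pvDiffWitnessOut_insert_tags_py : String × String := ("</strong></u>", "</strong></u></strong></u>")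

-- ===== CLAIM (what is proved, stated in full; the proofs are below) =====
def Claim_unchanged_insert_tags_py : Prop := ∀ (html_content : String) (spans : List (Int × Int)), Dom_insert_tags_py html_content spans → Pre_insert_tags_py html_content spans → Spec_insert_tags_py html_content spans (insert_tags_py html_content spans)
def Claim_changed_insert_tags_py : Prop := Dom_insert_tags_py (pvDiffWitness_insert_tags_py.1) (pvDiffWitness_insert_tags_py.2) ∧ Pre_insert_tags_py (pvDiffWitness_insert_tags_py.1) (pvDiffWitness_insert_tags_py.2) ∧ D_insert_tags_py (pvDiffWitness_insert_tags_py.1) (pvDiffWitness_insert_tags_py.2) ∧ insert_tags_py (pvDiffWitness_insert_tags_py.1) (pvDiffWitness_insert_tags_py.2) = pvDiffWitnessOut_insert_tags_py.1 ∧ insert_tags_py_alt (pvDiffWitness_insert_tags_py.1) (pvDiffWitness_insert_tags_py.2) = pvDiffWitnessOut_insert_tags_py.2 ∧ pvDiffWitnessOut_insert_tags_py.1 ≠ pvDiffWitnessOut_insert_tags_py.2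
def Claim_exact_insert_tags_py : Prop := ∀ (html_content : String) (spans : List (Int × Int)), Dom_insert_tags_py html_content spans → Pre_insert_tags_py html_content spans → D_insert_tags_py html_content spans → insert_tags_py html_content spans ≠ insert_tags_py_alt html_content spans

-- ===== LEMMAS AND PROOFS =====


-- String.mk on the list side: both ports build their result this way.
theorem pvStrMk {l : List Char} {s : String} (h : l = s.toList) : String.mk l = s := by
  rw [show String.mk l = String.ofList l from rfl, h, String.ofList_toList]

-- the trailing close A may append after its loop
def pvFinal (plain : Int) (sp : List (Int × Int)) : List Char :=
  match sp with
  | (_, b) :: _ => if plain = b then pvClose else []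
  | [] => []

theorem pvAccEq (r : List (List Char) × Int × List (Int × Int)) :
    (match r.2.2 with
      | (_, b) :: _ => if r.2.1 = b then r.1 ++ [pvClose] else r.1
      | [] => r.1).flatten = r.1.flatten ++ pvFinal r.2.1 r.2.2 := by
  rcases r with ⟨l, p, sp⟩
  cases sp with
  | nil => simp [pvFinal]
  | cons hd tl =>
    obtain ⟨a, b⟩ := hd
    by_cases h : p = b <;> simp [pvFinal, h]

theorem pvPreL_tail {c : Char} {l : List Char} (h : pvPreL (c :: l)) : pvPreL l := by
  intro i hi hc
  have := h (i + 1) (by simpa using Nat.succ_lt_succ hi) (by simpa using hc)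
  simpa using this

theorem pvSplitGt_isSome {l : List Char} (h : '>' ∈ l) : ∃ a b, pvSplitGt l = some (a, b) := by
  induction l with
  | nil => simp at h
  | cons c rest ih =>
    by_cases hc : c = '>'
    · exact ⟨[c], rest, by simp [pvSplitGt, hc]⟩
    · have : '>' ∈ rest := by
        rcases List.mem_cons.mp h with h1 | h1
        · exact absurd h1.symm hc
        · exact h1
      obtain ⟨a, b, hab⟩ := ih this
      exact ⟨c :: a, b, by simp [pvSplitGt, hc, hab]⟩

theorem pvSplitGt_pre : ∀ {l a b : List Char}, pvSplitGt l = some (a, b) → pvPreL l → pvPreL b := by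
  intro l
  induction l with
  | nil => intro a b h; simp [pvSplitGt] at h
  | cons c rest ih =>
    intro a b h hp
    simp only [pvSplitGt] at h
    split at h
    · injection h with h; injection h with h1 h2; subst h2
      exact pvPreL_tail hp
    · revert h; split
      · rename_i a' b' heq
        intro h
        injection h with h; injection h with h1 h2; subst h2
        exact ih heq (pvPreL_tail hp)
      · intro h; exact absurd h (by simp)

-- with no close due at p, the drain is a no-op
theorem pvDrain_noop {p : Int} {k : List (Int × Int)}
    (h : match k with | (_, b) :: _ => b ≠ p | [] => True) : pvDrain p k = (0, k) := by
  match k with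
  | [] => rfl
  | (a, b) :: k' => simp only [pvDrain]; rw [if_neg h]

-- pvOutB peel lemmas -------------------------------------------------------

theorem pvOutB_nil (p : Int) (k : List (Int × Int)) :
    pvOutB [] p k = pvCloseRep (pvDrain p k).1 := by
  simp [pvOutB, pvEvents, pvStitch]

theorem pvOutB_close {toks : List (Bool × List Char)} {p a : Int} {sp : List (Int × Int)} :
    pvOutB toks p ((a, p) :: sp) = pvClose ++ pvOutB toks p sp := by
  unfold pvOutB
  cases hP : (toks.filter (fun t => !t.1)).length with
  | zero => simp [pvEvents, pvDrain, pvCloseRep, List.append_assoc]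
  | succ n => simp [pvEvents, pvDrain, pvCloseRep, List.append_assoc]

theorem pvOutB_tag {toks : List (Bool × List Char)} {t : List Char} {p : Int} {k : List (Int × Int)}
    (h : match k with | (_, b) :: _ => b ≠ p | [] => True) :
    pvOutB ((true, t) :: toks) p k = t ++ pvOutB toks p k := by
  have hd0 : pvDrain p k = (0, k) := pvDrain_noop h
  have hf : ((true, t) :: toks).filter (fun t => !t.1) = toks.filter (fun t => !t.1) := by simp
  unfold pvOutB
  simp only [hf]
  cases hP : (toks.filter (fun t => !t.1)).length with
  | zero => simp [pvEvents, pvStitch, pvCloseRep, hd0]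
  | succ n => simp [pvEvents, pvStitch, pvCloseRep, hd0]

theorem pvOutB_char {toks : List (Bool × List Char)} {c : Char} {p : Int} {k : List (Int × Int)}
    (h : match k with | (_, b) :: _ => b ≠ p | [] => True) :
    pvOutB ((false, [c]) :: toks) p k =
      (match k with | (a, _) :: _ => if a = p then pvOpen else [] | [] => []) ++ [c] ++ pvOutB toks (p + 1) k := by
  have hd0 : pvDrain p k = (0, k) := pvDrain_noop h
  have hf : ((false, [c]) :: toks).filter (fun t => !t.1) = (false, [c]) :: toks.filter (fun t => !t.1) := by simp
  unfold pvOutB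
  simp only [hf, List.length_cons, pvEvents, hd0]
  have harith : p + (((toks.filter (fun t => !t.1)).length : ℤ) + 1) = p + 1 + ((toks.filter (fun t => !t.1)).length : ℤ) := by ring
  simp only [Nat.cast_add, Nat.cast_one, harith]
  cases hE : (pvEvents (toks.filter (fun t => !t.1)).length (p + 1) k).1 with
  | nil =>
    cases k with
    | nil => simp [pvStitch, pvCloseRep, hE]
    | cons hd tl => obtain ⟨a, b⟩ := hd; simp [pvStitch, pvCloseRep, hE]
  | cons ev evs =>
    cases k with
    | nil => simp [pvStitch, pvCloseRep, hE]
    | cons hd tl => obtain ⟨a, b⟩ := hd; simp [pvStitch, pvCloseRep, hE]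

-- the main correspondence: A's online loop, with its leftover state fully drained at the
-- final boundary, equals B's pipeline
theorem pvMain : ∀ (cs : List Char) (p : Int) (k : List (Int × Int)), pvPreL cs →
    (pvLoopA cs p k).1.flatten ++ pvCloseRep (pvDrain (pvLoopA cs p k).2.1 (pvLoopA cs p k).2.2).1
      = pvOutB (pvTokenize cs) p k := by
  intro cs p k
  induction cs, p, k using pvLoopA.induct with
  | case1 plain sp =>
    intro _
    simp only [pvLoopA, pvTokenize, List.flatten_nil, List.nil_append]
    exact (pvOutB_nil plain sp).symm
  | case2 c rest a b sp' ih =>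
    intro hp
    rw [pvOutB_close, ← ih hp]
    simp [pvLoopA, List.append_assoc]
  | case3 rest plain a b sp' hne chunk rem hsp ih =>
    intro hp
    have hprem : pvPreL rem := pvSplitGt_pre hsp (pvPreL_tail hp)
    rw [pvTokenize, if_pos rfl]
    rw [hsp]
    rw [pvOutB_tag (by exact fun hb => hne hb.symm), ← ih hprem]
    have hstep : pvLoopA ('<' :: rest) plain ((a, b) :: sp') =
        (('<' :: chunk) :: (pvLoopA rem plain ((a, b) :: sp')).1, (pvLoopA rem plain ((a, b) :: sp')).2) := by
      simp only [pvLoopA, if_neg hne, reduceIte]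
      split
      · rename_i hgt
        rw [hsp] at hgt
        obtain ⟨h1, h2⟩ := by simpa using hgt
        subst h1; subst h2; rfl
      · rename_i hgt
        rw [hsp] at hgt
        simp at hgt
    rw [hstep]
    simp [List.append_assoc]
  | case4 rest plain a b sp' hne hnone =>
    intro hp
    exfalso
    have hm : '>' ∈ '<' :: rest := hp 0 (by simp) (by simp)
    have : '>' ∈ rest := by
      rcases List.mem_cons.mp hm with h1 | h1
      · exact absurd h1 (by decide)
      · exact h1
    obtain ⟨x, y, hxy⟩ := pvSplitGt_isSome this
    rw [hxy] at hnone; simp at hnone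
  | case5 c rest plain a b sp' hne hc ih =>
    intro hp
    have hpr : pvPreL rest := pvPreL_tail hp
    rw [pvTokenize, if_neg hc]
    rw [pvOutB_char (by exact fun hb => hne hb.symm), ← ih hpr]
    by_cases hpa : plain = a
    · subst hpa
      simp [pvLoopA, hc, hne, List.append_assoc]
    · have hap : ¬ a = plain := fun hh => hpa hh.symm
      simp [pvLoopA, hc, hne, hpa, hap, List.append_assoc]
  | case6 rest plain chunk rem hsp ih =>
    intro hp
    have hprem : pvPreL rem := pvSplitGt_pre hsp (pvPreL_tail hp)
    rw [pvTokenize, if_pos rfl, hsp]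
    rw [pvOutB_tag trivial, ← ih hprem]
    have hstep : pvLoopA ('<' :: rest) plain ([]) =
        (('<' :: chunk) :: (pvLoopA rem plain ([])).1, (pvLoopA rem plain ([])).2) := by
      simp only [pvLoopA, reduceIte]
      split
      · rename_i hgt
        rw [hsp] at hgt
        obtain ⟨h1, h2⟩ := by simpa using hgt
        subst h1; subst h2; rfl
      · rename_i hgt
        rw [hsp] at hgt
        simp at hgt
    rw [hstep]
    simp [List.append_assoc]
  | case7 rest plain hnone =>
    intro hp
    exfalso
    have hm : '>' ∈ '<' :: rest := hp 0 (by simp) (by simp)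
    have : '>' ∈ rest := by
      rcases List.mem_cons.mp hm with h1 | h1
      · exact absurd h1 (by decide)
      · exact h1
    obtain ⟨x, y, hxy⟩ := pvSplitGt_isSome this
    rw [hxy] at hnone; simp at hnone
  | case8 c rest plain hc ih =>
    intro hp
    rw [pvTokenize, if_neg hc]
    rw [pvOutB_char trivial, ← ih (pvPreL_tail hp)]
    simp [pvLoopA, hc, List.append_assoc]

-- shape-scan lemmas --------------------------------------------------------

-- the first step of the scan on a nonempty list ignores the `last` flag
theorem dEnds_last_irrel (c : Char) (t : List Char) (inTag l l' : Bool) :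
    dEndsTagAux (c :: t) inTag l = dEndsTagAux (c :: t) inTag l' := by
  simp [dEndsTagAux]

theorem dAux_split : ∀ {rest chunk rem : List Char}, pvSplitGt rest = some (chunk, rem) →
    (∀ l, dEndsTagAux rest true l = dEndsTagAux rem false true) ∧
      ∀ acc, dPlainAux rest true acc = dPlainAux rem false acc := by
  intro rest
  induction rest with
  | nil => intro chunk rem h; simp [pvSplitGt] at h
  | cons c t ih =>
    intro chunk rem h
    simp only [pvSplitGt] at h
    split at h
    · rename_i hc
      obtain ⟨h1, h2⟩ := by simpa using h
      subst h2; subst hc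
      constructor
      · intro l; simp [dEndsTagAux]
      · intro acc; simp [dPlainAux]
    · rename_i hc
      cases heq : pvSplitGt t with
      | none => rw [heq] at h; simp at h
      | some ab =>
        obtain ⟨a', b'⟩ := ab
        rw [heq] at h
        simp only [Option.some.injEq, Prod.mk.injEq] at h
        obtain ⟨h1, h2⟩ := h; subst h2
        obtain ⟨he, hpl⟩ := ih heq
        have hcb : (c != '>') = true := by simpa using hc
        constructor
        · intro l; simp only [dEndsTagAux, if_pos trivial]
          rw [hcb]; exact he true
        · intro acc
          simp only [dPlainAux, if_pos trivial]
          rw [hcb]; exact hpl acc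


theorem dPlainAux_acc : ∀ (cs : List Char) (inTag : Bool) (acc : Nat),
    dPlainAux cs inTag acc = dPlainAux cs inTag 0 + acc := by
  intro cs
  induction cs with
  | nil => intro inTag acc; simp [dPlainAux]
  | cons c t ih =>
    intro inTag acc
    cases inTag with
    | true =>
      simp only [dPlainAux, if_pos rfl]
      exact ih _ acc
    | false =>
      by_cases hc : c = '<'
      · simp only [dPlainAux, Bool.false_eq_true, if_false, hc, if_pos rfl]
        exact ih _ acc
      · simp only [dPlainAux, Bool.false_eq_true, if_false, hc, if_neg hc]
        rw [ih false (acc + 1), ih false (0 + 1)]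
        omega

theorem dEndsTag_tag {rest chunk rem : List Char} (hsp : pvSplitGt rest = some (chunk, rem)) :
    dEndsTag ('<' :: rest) = (if rem = [] then true else dEndsTag rem) := by
  unfold dEndsTag
  have h1 : dEndsTagAux ('<' :: rest) false false = dEndsTagAux rest true true := by
    simp [dEndsTagAux]
  rw [h1, (dAux_split hsp).1 true]
  cases rem with
  | nil => simp [dEndsTagAux]
  | cons c' t' => rw [if_neg (by simp)]; exact dEnds_last_irrel c' t' false true false

theorem dEndsTag_plain {c : Char} {rest : List Char} (hc : ¬ c = '<') :
    dEndsTag (c :: rest) = dEndsTag rest := by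
  unfold dEndsTag
  simp [dEndsTagAux, hc]

theorem dPlain_tag {rest chunk rem : List Char} (hsp : pvSplitGt rest = some (chunk, rem)) :
    dPlain ('<' :: rest) = dPlain rem := by
  unfold dPlain
  have h1 : dPlainAux ('<' :: rest) false 0 = dPlainAux rest true 0 := by simp [dPlainAux]
  rw [h1, (dAux_split hsp).2 0]

theorem dPlain_plain {c : Char} {rest : List Char} (hc : ¬ c = '<') :
    dPlain (c :: rest) = dPlain rest + 1 := by
  unfold dPlain
  simp only [dPlainAux, hc, reduceIte]
  exact dPlainAux_acc rest false 1

theorem dPosPlain : ∀ (cs : List Char) (inTag : Bool),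
    dEndsTagAux cs inTag true = false → 1 ≤ dPlainAux cs inTag 0 := by
  intro cs
  induction cs with
  | nil => intro inTag h; simp [dEndsTagAux] at h
  | cons c t ih =>
    intro inTag h
    cases inTag with
    | true =>
      simp only [dEndsTagAux, if_pos rfl] at h
      simp only [dPlainAux, if_pos rfl]
      exact ih _ h
    | false =>
      by_cases hc : c = '<'
      · simp only [dEndsTagAux, Bool.false_eq_true, if_false, hc, if_pos rfl] at h
        simp only [dPlainAux, Bool.false_eq_true, if_false, hc, if_pos rfl]
        exact ih _ h
      · simp only [dPlainAux, Bool.false_eq_true, if_false, hc, if_neg hc]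
        rw [dPlainAux_acc]
        omega

-- cs nonempty and not ending inside/at a tag has at least one plain char
theorem dPlain_pos {c : Char} {rest : List Char} (h : dEndsTag (c :: rest) = false) :
    1 ≤ dPlain (c :: rest) := by
  by_cases hc : c = '<'
  · subst hc
    unfold dEndsTag at h
    have h1 : dEndsTagAux ('<' :: rest) false false = dEndsTagAux rest true true := by
      simp [dEndsTagAux]
    rw [h1] at h
    unfold dPlain
    have h2 : dPlainAux ('<' :: rest) false 0 = dPlainAux rest true 0 := by simp [dPlainAux]
    rw [h2]
    exact dPosPlain _ _ h
  · rw [dPlain_plain hc]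
    omega

-- dPend lo hi: the spans still pending after the closes due at the boundaries lo..hi-1
-- have been emitted: the maximal monotone prefix with ends in [lo, hi) is consumed.
def dPend (lo hi : Int) : List (Int × Int) → List (Int × Int)
  | [] => []
  | (a, b) :: t => if lo ≤ b ∧ b < hi then dPend b hi t else (a, b) :: t


-- dPend basics
theorem dPend_refl (p : Int) (k : List (Int × Int)) : dPend p p k = k := by
  cases k with
  | nil => rfl
  | cons hd tl =>
    obtain ⟨a, b⟩ := hd
    simp only [dPend]
    rw [if_neg (by omega)]

theorem dPend_head {p hi a : Int} {t : List (Int × Int)} (h : p < hi) :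
    dPend p hi ((a, p) :: t) = dPend p hi t := by
  simp only [dPend]
  rw [if_pos ⟨le_refl p, h⟩]

theorem dPend_succ {p hi : Int} {k : List (Int × Int)}
    (h : match k with | (_, b) :: _ => b ≠ p | [] => True) :
    dPend p hi k = dPend (p + 1) hi k := by
  cases k with
  | nil => rfl
  | cons hd tl =>
    obtain ⟨a, b⟩ := hd
    have hb : b ≠ p := h
    simp only [dPend]
    by_cases hcond : p ≤ b ∧ b < hi
    · rw [if_pos hcond, if_pos (by omega)]
    · rw [if_neg hcond, if_neg (by omega)]

-- dCount p k: how many leading spans of k end exactly at p (proof-side notion).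
def dCount (p : Int) : List (Int × Int) → Nat
  | (_, b) :: t => if b = p then dCount p t + 1 else 0
  | [] => 0

-- dPend drops exactly the prefix before the break index
theorem dPend_eq_drop (P : Int) : ∀ (L : List (Int × Int)) (lo : Int),
    dPend lo P L = L.drop (((lo :: L.map (fun s => s.2)).zip (L.map (fun s => s.2))).findIdx
      (fun q => !(decide (q.1 ≤ q.2 ∧ q.2 < P)))) := by
  intro L
  induction L with
  | nil => intro lo; simp [dPend]
  | cons hd tl ih =>
    intro lo
    obtain ⟨a, b⟩ := hd
    simp only [List.map_cons, List.zip_cons_cons, List.findIdx_cons]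
    by_cases hc : lo ≤ b ∧ b < P
    · simp only [dPend, if_pos hc, hc, decide_true, Bool.not_true]
      rw [ih b]
      simp [hc]
    · simp only [dPend, if_neg hc]
      simp [hc]

-- D_'s span condition says exactly that at least two pending spans end at the boundary
theorem dCount_iff (P : Int) (L : List (Int × Int)) :
    (2 ≤ dCount P (dPend 0 P L)) ↔
      (dBreak P (L.map (fun s => s.2)) + 1 < (L.map (fun s => s.2)).length ∧
        (L.map (fun s => s.2)).getD (dBreak P (L.map (fun s => s.2))) 0 = P ∧
        (L.map (fun s => s.2)).getD (dBreak P (L.map (fun s => s.2)) + 1) 0 = P) := by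
  rw [show dPend 0 P L = L.drop (dBreak P (L.map (fun s => s.2))) from dPend_eq_drop P L 0]
  set bs := L.map (fun s => s.2) with hbs
  set t := dBreak P bs with ht
  have hblen : bs.length = L.length := by rw [hbs]; exact List.length_map ..
  cases hdrop : L.drop t with
  | nil =>
    have : L.length ≤ t := by
      have := List.length_drop (l := L) (i := t)
      rw [hdrop] at this
      simp at this
      omega
    simp [dCount]
    omega
  | cons x r =>
    have hlen1 : (L.drop t).length = L.length - t := List.length_drop ..
    rw [hdrop] at hlen1
    have ht' : t < L.length := by simp at hlen1; omega
    have hcons := List.drop_eq_getElem_cons ht'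
    rw [hdrop] at hcons
    injection hcons with hx0 hrest
    cases hr : r with
    | nil =>
      have hlen2 : t + 1 = L.length := by rw [hr] at hlen1; simp at hlen1; omega
      obtain ⟨x1, x2⟩ := x
      constructor
      · intro h
        simp only [dCount] at h
        by_cases h1 : x2 = P
        · rw [if_pos h1] at h; omega
        · rw [if_neg h1] at h; omega
      · intro ⟨h1, _⟩
        omega
    | cons y r' =>
      subst hr
      have ht1 : t + 1 < L.length := by simp at hlen1; omega
      have hcons1 := List.drop_eq_getElem_cons ht1
      rw [← hrest] at hcons1
      injection hcons1 with hy0 hrest1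
      have hget1 : bs.getD t 0 = (L[t]).2 := by
        rw [List.getD_eq_getElem bs 0 (by omega)]
        simp only [hbs, List.getElem_map]
      have hget2 : bs.getD (t + 1) 0 = (L[t + 1]).2 := by
        rw [List.getD_eq_getElem bs 0 (by omega)]
        simp only [hbs, List.getElem_map]
      obtain ⟨x1, x2⟩ := x
      obtain ⟨y1, y2⟩ := y
      have hx2 : x2 = (L[t]).2 := by rw [← hx0]
      have hy2 : y2 = (L[t + 1]).2 := by rw [← hy0]
      constructor
      · intro h
        simp only [dCount] at h
        by_cases h1 : x2 = P
        · by_cases h2 : y2 = P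
          · exact ⟨by omega, by rw [hget1, ← hx2, h1], by rw [hget2, ← hy2, h2]⟩
          · rw [if_pos h1, if_neg h2] at h; omega
        · rw [if_neg h1] at h; omega
      · intro ⟨_, h1, h2⟩
        rw [hget1, ← hx2] at h1
        rw [hget2, ← hy2] at h2
        simp only [dCount, if_pos h1, if_pos h2]
        omega

theorem dCount_drain : ∀ (p : Int) (k : List (Int × Int)), (pvDrain p k).1 = dCount p k := by
  intro p k
  induction k with
  | nil => rfl
  | cons hd tl ih =>
    obtain ⟨a, b⟩ := hd
    simp only [pvDrain, dCount]
    by_cases hb : b = p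
    · rw [if_pos hb, if_pos hb, ih]
    · rw [if_neg hb, if_neg hb]

-- Theorem L: if the HTML ends inside markup, A's loop has already drained every close
-- due at the final boundary, so nothing more is due.
theorem pvEndsTagDrained : ∀ (cs : List Char) (p : Int) (k : List (Int × Int)), pvPreL cs →
    dEndsTag cs = true →
    (pvDrain (pvLoopA cs p k).2.1 (pvLoopA cs p k).2.2).1 = 0 := by
  intro cs p k
  induction cs, p, k using pvLoopA.induct with
  | case1 plain sp => intro _ he; simp [dEndsTag, dEndsTagAux] at he
  | case2 c rest a b sp' ih =>
    intro hp he
    simpa [pvLoopA] using ih hp he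
  | case3 rest plain a b sp' hne chunk rem hsp ih =>
    intro hp he
    have hprem : pvPreL rem := pvSplitGt_pre hsp (pvPreL_tail hp)
    have hstep : (pvLoopA ('<' :: rest) plain ((a, b) :: sp')).2 = (pvLoopA rem plain ((a, b) :: sp')).2 := by
      simp only [pvLoopA, if_neg hne, reduceIte]
      split
      · rename_i hgt
        rw [hsp] at hgt
        obtain ⟨h1, h2⟩ := by simpa using hgt
        subst h1; subst h2; rfl
      · rename_i hgt; rw [hsp] at hgt; simp at hgt
    rw [hstep]
    rw [dEndsTag_tag hsp] at he
    by_cases hrem : rem = []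
    · subst hrem
      simp only [pvLoopA]
      rw [dCount_drain]
      simp only [dCount]
      rw [if_neg (by exact fun hb => hne hb.symm)]
    · rw [if_neg hrem] at he
      exact ih hprem he
  | case4 rest plain a b sp' hne hnone =>
    intro hp _
    exfalso
    have hm : '>' ∈ '<' :: rest := hp 0 (by simp) (by simp)
    have : '>' ∈ rest := by
      rcases List.mem_cons.mp hm with h1 | h1
      · exact absurd h1 (by decide)
      · exact h1
    obtain ⟨x, y, hxy⟩ := pvSplitGt_isSome this
    rw [hxy] at hnone; simp at hnone
  | case5 c rest plain a b sp' hne hc ih =>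
    intro hp he
    have hrec : dEndsTag rest = true := by
      rwa [dEndsTag_plain hc] at he
    have := ih (pvPreL_tail hp) hrec
    simpa [pvLoopA, hc, hne] using this
  | case6 rest plain chunk rem hsp ih =>
    intro hp he
    have hprem : pvPreL rem := pvSplitGt_pre hsp (pvPreL_tail hp)
    have hstep : (pvLoopA ('<' :: rest) plain ([] : List (Int × Int))).2 = (pvLoopA rem plain []).2 := by
      simp only [pvLoopA, reduceIte]
      split
      · rename_i hgt
        rw [hsp] at hgt
        obtain ⟨h1, h2⟩ := by simpa using hgt
        subst h1; subst h2; rfl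
      · rename_i hgt; rw [hsp] at hgt; simp at hgt
    rw [hstep]
    rw [dEndsTag_tag hsp] at he
    by_cases hrem : rem = []
    · subst hrem
      simp [pvLoopA, pvDrain]
    · rw [if_neg hrem] at he
      exact ih hprem he
  | case7 rest plain hnone =>
    intro hp _
    exfalso
    have hm : '>' ∈ '<' :: rest := hp 0 (by simp) (by simp)
    have : '>' ∈ rest := by
      rcases List.mem_cons.mp hm with h1 | h1
      · exact absurd h1 (by decide)
      · exact h1
    obtain ⟨x, y, hxy⟩ := pvSplitGt_isSome this
    rw [hxy] at hnone; simp at hnone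
  | case8 c rest plain hc ih =>
    intro hp he
    have hrec : dEndsTag rest = true := by
      rwa [dEndsTag_plain hc] at he
    have := ih (pvPreL_tail hp) hrec
    simpa [pvLoopA, hc] using this

-- Theorem C: if the HTML does not end inside markup, A's final state is the plain
-- length and the monotone-prefix pending computation.
theorem pvStateChar : ∀ (cs : List Char) (p : Int) (k : List (Int × Int)), pvPreL cs →
    dEndsTag cs = false →
    (pvLoopA cs p k).2.1 = p + (dPlain cs : Int) ∧
      (pvLoopA cs p k).2.2 = dPend p (p + (dPlain cs : Int)) k := by
  intro cs p k
  induction cs, p, k using pvLoopA.induct with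
  | case1 plain sp =>
    intro _ _
    refine ⟨by simp [pvLoopA, dPlain, dPlainAux], ?_⟩
    simp only [pvLoopA, dPlain, dPlainAux, Nat.cast_zero, add_zero]
    exact (dPend_refl plain sp).symm
  | case2 c rest a b sp' ih =>
    intro hp he
    obtain ⟨h1, h2⟩ := ih hp he
    have hpos : 1 ≤ dPlain (c :: rest) := dPlain_pos he
    have hstep : (pvLoopA (c :: rest) b ((a, b) :: sp')).2 = (pvLoopA (c :: rest) b sp').2 := by
      simp [pvLoopA]
    rw [hstep]
    refine ⟨h1, ?_⟩
    rw [h2, dPend_head (by omega)]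
  | case3 rest plain a b sp' hne chunk rem hsp ih =>
    intro hp he
    have hprem : pvPreL rem := pvSplitGt_pre hsp (pvPreL_tail hp)
    rw [dEndsTag_tag hsp] at he
    have hrem_ne : rem ≠ [] := by
      intro hr
      rw [if_pos hr] at he
      simp at he
    have hrec : dEndsTag rem = false := by
      rwa [if_neg hrem_ne] at he
    have hpl : dPlain ('<' :: rest) = dPlain rem := dPlain_tag hsp
    have hstep : (pvLoopA ('<' :: rest) plain ((a, b) :: sp')).2 = (pvLoopA rem plain ((a, b) :: sp')).2 := by
      simp only [pvLoopA, if_neg hne, reduceIte]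
      split
      · rename_i hgt
        rw [hsp] at hgt
        obtain ⟨h1, h2⟩ := by simpa using hgt
        subst h1; subst h2; rfl
      · rename_i hgt; rw [hsp] at hgt; simp at hgt
    rw [hstep, hpl]
    exact ih hprem hrec
  | case4 rest plain a b sp' hne hnone =>
    intro hp _
    exfalso
    have hm : '>' ∈ '<' :: rest := hp 0 (by simp) (by simp)
    have : '>' ∈ rest := by
      rcases List.mem_cons.mp hm with h1 | h1
      · exact absurd h1 (by decide)
      · exact h1
    obtain ⟨x, y, hxy⟩ := pvSplitGt_isSome this
    rw [hxy] at hnone; simp at hnone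
  | case5 c rest plain a b sp' hne hc ih =>
    intro hp he
    have hrec : dEndsTag rest = false := by
      rwa [dEndsTag_plain hc] at he
    obtain ⟨h1, h2⟩ := ih (pvPreL_tail hp) hrec
    have hpl : dPlain (c :: rest) = dPlain rest + 1 := dPlain_plain hc
    have hstep : (pvLoopA (c :: rest) plain ((a, b) :: sp')).2 = (pvLoopA rest (plain + 1) ((a, b) :: sp')).2 := by
      simp [pvLoopA, hne, hc]
    rw [hstep, hpl]
    constructor
    · rw [h1]; push_cast; ring
    · rw [h2]
      have harith : plain + ((dPlain rest + 1 : Nat) : Int) = plain + 1 + (dPlain rest : Int) := by push_cast; ring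
      rw [harith]
      exact (dPend_succ (p := plain) (hi := plain + 1 + (dPlain rest : Int)) (k := (a, b) :: sp') (by intro hb; exact hne hb.symm)).symm
  | case6 rest plain chunk rem hsp ih =>
    intro hp he
    have hprem : pvPreL rem := pvSplitGt_pre hsp (pvPreL_tail hp)
    rw [dEndsTag_tag hsp] at he
    have hrem_ne : rem ≠ [] := by
      intro hr
      rw [if_pos hr] at he
      simp at he
    have hrec : dEndsTag rem = false := by
      rwa [if_neg hrem_ne] at he
    have hpl : dPlain ('<' :: rest) = dPlain rem := dPlain_tag hsp
    have hstep : (pvLoopA ('<' :: rest) plain ([] : List (Int × Int))).2 = (pvLoopA rem plain []).2 := by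
      simp only [pvLoopA, reduceIte]
      split
      · rename_i hgt
        rw [hsp] at hgt
        obtain ⟨h1, h2⟩ := by simpa using hgt
        subst h1; subst h2; rfl
      · rename_i hgt; rw [hsp] at hgt; simp at hgt
    rw [hstep, hpl]
    exact ih hprem hrec
  | case7 rest plain hnone =>
    intro hp _
    exfalso
    have hm : '>' ∈ '<' :: rest := hp 0 (by simp) (by simp)
    have : '>' ∈ rest := by
      rcases List.mem_cons.mp hm with h1 | h1
      · exact absurd h1 (by decide)
      · exact h1
    obtain ⟨x, y, hxy⟩ := pvSplitGt_isSome this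
    rw [hxy] at hnone; simp at hnone
  | case8 c rest plain hc ih =>
    intro hp he
    have hrec : dEndsTag rest = false := by
      rwa [dEndsTag_plain hc] at he
    obtain ⟨h1, h2⟩ := ih (pvPreL_tail hp) hrec
    have hpl : dPlain (c :: rest) = dPlain rest + 1 := dPlain_plain hc
    have hstep : (pvLoopA (c :: rest) plain ([] : List (Int × Int))).2 = (pvLoopA rest (plain + 1) []).2 := by
      simp [pvLoopA, hc]
    rw [hstep, hpl]
    constructor
    · rw [h1]; push_cast; ring
    · rw [h2]
      have harith : plain + ((dPlain rest + 1 : Nat) : Int) = plain + 1 + (dPlain rest : Int) := by push_cast; ring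
      rw [harith]
      exact dPend_succ trivial
  termination_by cs _ k => (cs.length, k.length)

theorem pvCloseRep_len : ∀ n, (pvCloseRep n).length = 13 * n := by
  intro n
  induction n with
  | zero => rfl
  | succ m ih =>
    have h13 : pvClose.length = 13 := by decide
    simp [pvCloseRep, ih, h13]; ring

-- the common list-level description of both outputs
theorem pvABLists (html_content : String) (spans : List (Int × Int))
    (hpre : pvPreL html_content.toList) :
    insert_tags_py html_content spans
        = String.mk ((pvLoopA html_content.toList 0 (PySem.List.sorted spans (fun s => s.1) false)).1.flatten
            ++ pvFinal (pvLoopA html_content.toList 0 (PySem.List.sorted spans (fun s => s.1) false)).2.1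
                 (pvLoopA html_content.toList 0 (PySem.List.sorted spans (fun s => s.1) false)).2.2) ∧
      insert_tags_py_alt html_content spans
        = String.mk ((pvLoopA html_content.toList 0 (PySem.List.sorted spans (fun s => s.1) false)).1.flatten
            ++ pvCloseRep (pvDrain (pvLoopA html_content.toList 0 (PySem.List.sorted spans (fun s => s.1) false)).2.1
                 (pvLoopA html_content.toList 0 (PySem.List.sorted spans (fun s => s.1) false)).2.2).1) := by
  constructor
  · simp only [insert_tags_py]
    rw [pvAccEq]
  · simp only [insert_tags_py_alt]
    rw [← pvMain html_content.toList 0 (PySem.List.sorted spans (fun s => s.1) false) hpre]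

-- the final-boundary comparison outside D_: at most one close is due, and then the
-- single check and the full drain agree
theorem pvFinalAgree (P : Int) (Q : List (Int × Int)) (hle : dCount P Q ≤ 1) :
    pvFinal P Q = pvCloseRep (pvDrain P Q).1 := by
  rw [dCount_drain]
  cases Q with
  | nil => rfl
  | cons hd tl =>
    obtain ⟨a, b⟩ := hd
    by_cases hb : b = P
    · subst hb
      have h' : dCount b ((a, b) :: tl) = dCount b tl + 1 := by simp [dCount]
      rw [h'] at hle ⊢
      have h0 : dCount b tl = 0 := by omega
      rw [h0]
      simp [pvFinal, pvCloseRep]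
    · have h' : dCount P ((a, b) :: tl) = 0 := by simp [dCount, hb]
      rw [h']
      have hb' : ¬ P = b := fun h => hb h.symm
      simp [pvFinal, pvCloseRep, hb']


-- ===== VERDICT (by name: the statement is the Claim_ definition above) =====
theorem insert_tags_py_spec : Claim_unchanged_insert_tags_py := by
  intro html spans _ hpre hnd
  obtain ⟨hA, hB⟩ := pvABLists html spans hpre
  rw [hA, hB]
  congr 1
  congr 1
  cases hE : dEndsTag html.toList with
  | true =>
    have h0 := pvEndsTagDrained html.toList 0 (PySem.List.sorted spans (fun s => s.1) false) hpre hE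
    rw [dCount_drain] at h0
    rw [pvFinalAgree _ _ (by omega)]
  | false =>
    obtain ⟨h1, h2⟩ := pvStateChar html.toList 0 (PySem.List.sorted spans (fun s => s.1) false) hpre hE
    have hcnt : dCount ((dPlain html.toList : Int))
        (dPend 0 ((dPlain html.toList : Int)) (PySem.List.sorted spans (fun s => s.1) false)) ≤ 1 := by
      by_contra hgt
      exact hnd ⟨hE, (dCount_iff _ _).mp (by omega)⟩
    rw [pvFinalAgree]
    rw [h1, h2]
    simpa using hcnt

theorem insert_tags_py_changed : Claim_changed_insert_tags_py := by
  unfold Claim_changed_insert_tags_py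
  refine ⟨by decide, by decide, by decide, ?_, ?_, by decide⟩
  · show insert_tags_py "" [((0 : Int), (0 : Int)), ((0 : Int), (0 : Int))] = "</strong></u>"
    unfold insert_tags_py
    apply pvStrMk
    rw [show ("" : String).toList = [] from rfl]
    simp [pvLoopA]
    decide
  · show insert_tags_py_alt "" [((0 : Int), (0 : Int)), ((0 : Int), (0 : Int))] = "</strong></u></strong></u>"
    unfold insert_tags_py_alt
    apply pvStrMk
    rw [show ("" : String).toList = [] from rfl]
    rw [show pvTokenize [] = [] from by simp [pvTokenize]]
    decide

theorem insert_tags_py_tight : Claim_exact_insert_tags_py := by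
  intro html spans _ hpre hd heq
  obtain ⟨hE, hcnt'⟩ := hd
  have hcnt := (dCount_iff ((dPlain html.toList : Int)) (PySem.List.sorted spans (fun s => s.1) false)).mpr hcnt'
  obtain ⟨hA, hB⟩ := pvABLists html spans hpre
  rw [hA, hB] at heq
  have hlist := congrArg String.toList heq
  simp only [show (String.mk : List Char → String) = String.ofList from rfl, String.toList_ofList] at hlist
  have hlen := congrArg List.length hlist
  obtain ⟨h1, h2⟩ := pvStateChar html.toList 0 (PySem.List.sorted spans (fun s => s.1) false) hpre hE
  set F := pvLoopA html.toList 0 (PySem.List.sorted spans (fun s => s.1) false) with hF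
  have hdr : (pvDrain F.2.1 F.2.2).1 = dCount ((dPlain html.toList : Int))
      (dPend 0 ((dPlain html.toList : Int)) (PySem.List.sorted spans (fun s => s.1) false)) := by
    rw [dCount_drain, h1, h2]; simp
  have hfin : (pvFinal F.2.1 F.2.2).length = 13 := by
    have hQ : F.2.2 = dPend 0 ((dPlain html.toList : Int)) (PySem.List.sorted spans (fun s => s.1) false) := by
      rw [h2]; simp
    cases hq : F.2.2 with
    | nil =>
      rw [hq] at hdr
      simp [pvDrain, dCount] at hdr
      omega
    | cons hd tl =>
      obtain ⟨a, b⟩ := hd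
      rw [hq] at hdr
      by_cases hb : b = F.2.1
      · simp only [pvFinal, if_pos hb.symm]
        decide
      · exfalso
        simp only [pvDrain, if_neg hb] at hdr
        omega
  rw [List.length_append, List.length_append, pvCloseRep_len, hdr, hfin] at hlen
  omega
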